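-- pv_equiv track=rewrite | github.com/123sania456789/NPTEL | THE JOY OF COMPUTING USING PYHTON/W9/Q1.py | orangecap
-- ===== SOURCE A (Python) =====
-- def orangecap(d):
--     total={}
--     l=[]
--     for p in d.values():
--         for ply in p.keys():
--             if ply not in l:
--                 l=l+[ply]
--     for n in l:
--         total[n]=0
--         for match in d.keys():
--             if n in d[match].keys():
--                 total[n]=total[n]+d[match][n]
--     topscore=0
--     for player in total.keys():
--             if total[player] > topscore:
--                 playername=player
--                 topscore=total[player]
--     return (playername,topscore)
-- ===== SOURCE B (Python) =====
-- def orangecap(d):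
--     total = {}
--     for scores in d.values():
--         for player, runs in scores.items():
--             total[player] = total.get(player, 0) + runs
--     return max(total.items(), key=lambda kv: kv[1])
-- ===== Notes on version B (the rewrite author's own statement) =====
-- stated objective: faster
-- what changed: Replaces A's three passes (dedup player list, then per-player rescan of every match, then a strict-max loop) by one pass that aggregates runs into a dict plus a single max() over its items.
import Mathlib
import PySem

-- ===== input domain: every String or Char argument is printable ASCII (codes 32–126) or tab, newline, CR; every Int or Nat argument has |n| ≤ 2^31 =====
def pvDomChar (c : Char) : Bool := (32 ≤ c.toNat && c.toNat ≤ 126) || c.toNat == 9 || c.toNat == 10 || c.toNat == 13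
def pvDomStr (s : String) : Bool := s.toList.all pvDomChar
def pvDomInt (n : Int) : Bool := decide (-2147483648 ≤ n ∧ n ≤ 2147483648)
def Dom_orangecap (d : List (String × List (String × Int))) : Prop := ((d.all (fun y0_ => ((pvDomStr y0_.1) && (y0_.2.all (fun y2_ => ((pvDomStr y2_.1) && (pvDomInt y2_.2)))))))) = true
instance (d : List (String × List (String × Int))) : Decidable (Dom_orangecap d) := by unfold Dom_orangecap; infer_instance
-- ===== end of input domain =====

-- B replaces A's three passes (dedup player list, per-player rescan of all matches, strict-max loop)
-- by one aggregation pass into a totals dict followed by max() over its items.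

-- ===== PORT A =====
def orangecap (d0 : List (String × List (String × Int))) : String × Int :=
  let d : PySem.Dict String (PySem.Dict String Int) :=
    PySem.Dict.ofList (d0.map (fun p => (p.1, PySem.Dict.ofList p.2)))
  let l : List String :=
    d.values.foldl (fun l p =>
      p.keys.foldl (fun l ply => if ply ∈ l then l else l ++ [ply]) l) []
  let total : PySem.Dict String Int :=
    l.foldl (fun total n =>
      d.keys.foldl (fun total m =>
        let pm := d.getD m PySem.Dict.empty   -- m ∈ d.keys, so this lookup never misses
        if pm.contains n then total.insert n (total.getD n 0 + pm.getD n 0) else total)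
        (total.insert n 0))
      PySem.Dict.empty
  let r := total.items.foldl (fun (acc : Option String × Int) p =>
      if acc.2 < p.2 then (some p.1, p.2) else acc) (none, 0)
  (r.1.getD "", r.2)   -- r.1 = none exactly where Python's playername is unbound (NameError, outside Pre_)

-- ===== PORT B =====
def orangecap_alt (d0 : List (String × List (String × Int))) : String × Int :=
  let d : PySem.Dict String (PySem.Dict String Int) :=
    PySem.Dict.ofList (d0.map (fun p => (p.1, PySem.Dict.ofList p.2)))
  let total : PySem.Dict String Int :=
    d.values.foldl (fun total scores =>
      scores.items.foldl (fun total pr => total.insert pr.1 (total.getD pr.1 0 + pr.2)) total)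
      PySem.Dict.empty
  match PySem.List.max? total.items (fun kv => kv.2) with
  | some m => m
  | none => ("", 0)   -- empty totals: Python B's max raises ValueError (outside Pre_)

-- ===== PRECONDITION & SPEC =====
-- the dict-of-dicts both Pythons are handed, and a player's total runs across its (surviving) matches
def pvOuter (d0 : List (String × List (String × Int))) : PySem.Dict String (PySem.Dict String Int) :=
  PySem.Dict.ofList (d0.map (fun p => (p.1, PySem.Dict.ofList p.2)))
def pvTotal (d0 : List (String × List (String × Int))) (n : String) : Int :=
  ((pvOuter d0).values.map (fun m => m.getD n 0)).sum

-- Pre_ excludes exactly the inputs where A raises: when no mentioned player has a strictly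
-- positive total, A's playername is never bound and A's return raises NameError.
def Pre_orangecap (d : List (String × List (String × Int))) : Prop :=
  ∃ e ∈ d, ∃ q ∈ e.2, 0 < pvTotal d q.1
instance (d : List (String × List (String × Int))) : Decidable (Pre_orangecap d) := by
  unfold Pre_orangecap; infer_instance

def pvWitness_orangecap : (List (String × List (String × Int))) := [("m1", [("p", 5)])]

def Spec_orangecap (d : List (String × List (String × Int))) (out : String × Int) : Prop := out = orangecap_alt d
instance (d : List (String × List (String × Int))) (out : String × Int) : Decidable (Spec_orangecap d out) := by unfold Spec_orangecap; infer_instance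

-- ===== CLAIM (what is proved, stated in full; the proofs are below) =====
def Claim_equal_orangecap : Prop := ∀ (d : List (String × List (String × Int))), Dom_orangecap d → Pre_orangecap d → Spec_orangecap d (orangecap d)

-- ===== LEMMAS AND PROOFS =====

-- proof-only abbreviations
def pvV (d0 : List (String × List (String × Int))) : List (PySem.Dict String Int) :=
  (pvOuter d0).values
def pvL (d0 : List (String × List (String × Int))) : List String :=
  PySem.Set.ofList ((pvV d0).flatMap PySem.Dict.keys)
def pvItems (d0 : List (String × List (String × Int))) : List (String × Int) :=
  (pvL d0).map (fun n => (n, pvTotal d0 n))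

def pvFm (a : String × Int) (l : List (String × Int)) : String × Int :=
  l.foldl (fun b y => if b.2 < y.2 then y else b) a
def pvSel (l : List (String × Int)) (acc : Option String × Int) : Option String × Int :=
  l.foldl (fun acc p => if acc.2 < p.2 then (some p.1, p.2) else acc) acc
def pvAgg (t : PySem.Dict String Int) (ps : List (String × Int)) : PySem.Dict String Int :=
  ps.foldl (fun total pr => total.insert pr.1 (total.getD pr.1 0 + pr.2)) t

-- ---- A's dedup loop is Set.ofList of the flattened key lists ----
theorem pv_l_eq (V : List (PySem.Dict String Int)) :
    V.foldl (fun l p => p.keys.foldl (fun l ply => if ply ∈ l then l else l ++ [ply]) l) []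
      = PySem.Set.ofList (V.flatMap PySem.Dict.keys) := by
  rw [PySem.Set.ofList_eq_foldl, ← List.foldl_flatMap]
  apply PySem.List.foldl_congr_mem
  intro acc x _
  simp [PySem.Set.add, List.contains_eq_mem]

-- ---- a dict already holding (n, v) absorbs insert n v ----
theorem pv_insert_self (d : PySem.Dict String Int) (n : String) (v : Int)
    (hnd : d.keys.Nodup) (h : d.get? n = some v) : d.insert n v = d := by
  have hc : d.contains n = true := by
    rw [PySem.Dict.contains_eq_isSome_get?, h]; rfl
  apply PySem.Dict.ext
  rw [PySem.Dict.items_insert_of_contains d v hc]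
  have : ∀ p ∈ d.items, (if (p.1 == n) = true then (n, v) else p) = p := by
    intro p hp
    by_cases hpn : p.1 = n
    · have hmem : (n, p.2) ∈ d.items := by rw [← hpn]; exact hp
      have := (PySem.Dict.get?_eq_some_iff_mem_items d n p.2 hnd).mpr hmem
      rw [h] at this
      have hv : p.2 = v := by injection this.symm
      rw [← hpn, ← hv]; simp
    · simp [hpn]
  calc List.map (fun p => if (p.1 == n) = true then (n, v) else p) d.items
      = List.map id d.items := List.map_congr_left (by intro p hp; simpa using this p hp)
    _ = d.items := List.map_id d.items

-- ---- A's inner per-player summation loop ----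
theorem pv_inner (ms : List (PySem.Dict String Int)) :
    ∀ (t : PySem.Dict String Int) (n : String) (v : Int), t.get? n = some v → t.keys.Nodup →
    ms.foldl (fun t m => if m.contains n then t.insert n (t.getD n 0 + m.getD n 0) else t) t
      = t.insert n (v + (ms.map (fun m => m.getD n 0)).sum) := by
  induction ms with
  | nil =>
    intro t n v h hnd
    simpa using (pv_insert_self t n v hnd h).symm
  | cons m ms ih =>
    intro t n v h hnd
    by_cases hc : m.contains n = true
    · have hg : t.getD n 0 = v := by
        rw [PySem.Dict.getD_eq_get?_getD, h]; rfl
      simp only [List.foldl_cons, hc, if_true, hg]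
      rw [ih (t.insert n (v + m.getD n 0)) n (v + m.getD n 0)
            (PySem.Dict.get?_insert_self t n _) (PySem.Dict.nodup_keys_insert t n _ hnd),
          PySem.Dict.insert_insert_self]
      simp [add_assoc]
    · have hc' : m.contains n = false := by simpa using hc
      have hg : m.getD n 0 = 0 := PySem.Dict.getD_of_not_contains m 0 hc'
      simp only [List.foldl_cons]
      rw [if_neg hc, ih t n v h hnd]
      simp [hg]

-- ---- A's outer totals loop, rewritten to simple inserts ----
theorem pv_outer (D : PySem.Dict String (PySem.Dict String Int)) (hnd : D.keys.Nodup)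
    (ns : List String) :
    ∀ (t : PySem.Dict String Int), t.keys.Nodup →
    ns.foldl (fun total n =>
        D.keys.foldl (fun total m =>
          let pm := D.getD m PySem.Dict.empty
          if pm.contains n then total.insert n (total.getD n 0 + pm.getD n 0) else total)
          (total.insert n 0)) t
      = ns.foldl (fun t n => t.insert n ((D.values.map (fun m => m.getD n 0)).sum)) t := by
  induction ns with
  | nil => intro t _; rfl
  | cons n ns ih =>
    intro t hnd'
    simp only [List.foldl_cons]
    have hkv : D.keys.foldl (fun total m =>
          let pm := D.getD m PySem.Dict.empty
          if pm.contains n then total.insert n (total.getD n 0 + pm.getD n 0) else total)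
          (t.insert n 0)
        = D.values.foldl (fun total pm =>
            if pm.contains n then total.insert n (total.getD n 0 + pm.getD n 0) else total)
          (t.insert n 0) := by
      rw [PySem.Dict.values_eq_map_keys D hnd PySem.Dict.empty, List.foldl_map]
    rw [hkv, pv_inner D.values (t.insert n 0) n 0 (PySem.Dict.get?_insert_self t n 0)
          (PySem.Dict.nodup_keys_insert t n 0 hnd'),
        PySem.Dict.insert_insert_self, zero_add]
    exact ih (t.insert n _) (PySem.Dict.nodup_keys_insert t n _ hnd')

-- ---- key-unique association lists: the filter at a present key is a singleton ----
theorem pv_filter_key (its : List (String × Int)) (n : String) (v : Int)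
    (hnd : (its.map (fun p => p.1)).Nodup) (hmem : (n, v) ∈ its) :
    its.filter (fun p => p.1 == n) = [(n, v)] := by
  induction its with
  | nil => cases hmem
  | cons p rest ih =>
    simp only [List.map_cons, List.nodup_cons] at hnd
    rcases List.mem_cons.mp hmem with hp | hp
    · subst hp
      simp only [List.filter_cons, beq_self_eq_true, if_pos trivial]
      have : rest.filter (fun p => p.1 == n) = [] := by
        apply List.filter_eq_nil_iff.mpr
        intro q hq hbeq
        exact hnd.1 (List.mem_map.mpr ⟨q, hq, (by simpa using hbeq)⟩)
      simp [this]
    · have hpn : p.1 ≠ n := by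
        intro hpn
        exact hnd.1 (hpn ▸ List.mem_map.mpr ⟨(n, v), hp, rfl⟩)
      simp only [List.filter_cons]
      rw [if_neg (by simpa using hpn)]
      exact ih hnd.2 hp

-- ---- a key-unique dict's lookup as a sum over its filtered items ----
theorem pv_getD_filter (m : PySem.Dict String Int) (n : String) (hnd : m.keys.Nodup) :
    m.getD n 0 = ((m.items.filter (fun p => p.1 == n)).map (fun p => p.2)).sum := by
  cases hg : m.get? n with
  | none =>
    have hfil : m.items.filter (fun p => p.1 == n) = [] := by
      apply List.filter_eq_nil_iff.mpr
      intro q hq hbeq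
      have hqn : q.1 = n := by simpa using hbeq
      have : m.get? n = some q.2 :=
        (PySem.Dict.get?_eq_some_iff_mem_items m n q.2 hnd).mpr (by rw [← hqn]; exact hq)
      rw [hg] at this; cases this
    rw [PySem.Dict.getD_eq_get?_getD, hg, hfil]; rfl
  | some v =>
    have hmem : (n, v) ∈ m.items := (PySem.Dict.get?_eq_some_iff_mem_items m n v hnd).mp hg
    have hnd' : (m.items.map (fun p => p.1)).Nodup := hnd
    rw [PySem.Dict.getD_eq_get?_getD, hg, pv_filter_key m.items n v hnd' hmem]
    simp

-- ---- B's aggregation loop: lookup is seed plus filtered sum ----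
theorem pv_getD_agg (ps : List (String × Int)) :
    ∀ (t : PySem.Dict String Int) (n : String),
    (pvAgg t ps).getD n 0 = t.getD n 0 + ((ps.filter (fun p => p.1 == n)).map (fun p => p.2)).sum := by
  induction ps with
  | nil => intro t n; simp [pvAgg]
  | cons p ps ih =>
    intro t n
    simp only [pvAgg, List.foldl_cons] at *
    rw [ih (t.insert p.1 (t.getD p.1 0 + p.2)) n, PySem.Dict.getD_insert]
    by_cases hpn : p.1 = n
    · subst hpn
      simp only [List.filter_cons, beq_self_eq_true, if_pos trivial, List.map_cons, List.sum_cons]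
      ring
    · rw [if_neg (fun h => hpn h.symm)]
      simp only [List.filter_cons]
      rw [if_neg (by simpa using hpn)]

-- ---- every inner dict handed to the ports has unique keys ----
theorem pv_foldl_insert_values (ps : List (String × PySem.Dict String Int)) :
    ∀ (d : PySem.Dict String (PySem.Dict String Int)) (w : PySem.Dict String Int),
    w ∈ (ps.foldl (fun acc p => acc.insert p.1 p.2) d).values → w ∈ d.values ∨ ∃ p ∈ ps, w = p.2 := by
  induction ps with
  | nil => intro d w h; exact Or.inl h
  | cons p ps ih =>
    intro d w h
    rcases ih (d.insert p.1 p.2) w h with h' | h'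
    · rcases PySem.Dict.mem_values_insert d p.1 p.2 w h' with h'' | h''
      · exact Or.inr ⟨p, List.mem_cons_self .., h''⟩
      · exact Or.inl h''
    · rcases h' with ⟨q, hq, hw⟩
      exact Or.inr ⟨q, List.mem_cons_of_mem _ hq, hw⟩

theorem pv_values_nodup (d0 : List (String × List (String × Int))) :
    ∀ m ∈ pvV d0, m.keys.Nodup := by
  intro m hm
  have : m ∈ (PySem.Dict.empty : PySem.Dict String (PySem.Dict String Int)).values ∨
      ∃ p ∈ d0.map (fun p => (p.1, PySem.Dict.ofList p.2)), m = p.2 := by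
    apply pv_foldl_insert_values _ _ _ ?_
    simpa [pvV, pvOuter, PySem.Dict.ofList, PySem.Dict.update] using hm
  rcases this with h | ⟨p, hp, hm'⟩
  · simp [PySem.Dict.empty, PySem.Dict.values] at h
  · rcases List.mem_map.mp hp with ⟨e, _, he⟩
    subst hm'
    rw [← he]
    exact PySem.Dict.nodup_keys_ofList e.2

-- ---- the player's total as a sum over the flattened items ----
theorem pv_total_pairs (d0 : List (String × List (String × Int))) (n : String) :
    pvTotal d0 n
      = ((((pvV d0).flatMap PySem.Dict.items).filter (fun p => p.1 == n)).map (fun p => p.2)).sum := by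
  rw [List.filter_flatMap, List.map_flatMap, List.flatMap_def, List.sum_flatten, List.map_map]
  unfold pvTotal
  rw [show (pvOuter d0).values = pvV d0 from rfl]
  apply congrArg List.sum
  apply List.map_congr_left
  intro m hm
  exact pv_getD_filter m n (pv_values_nodup d0 m hm)

-- ---- port A computes the selection fold over pvItems ----
theorem pv_A_char (d0 : List (String × List (String × Int))) :
    orangecap d0 = ((pvSel (pvItems d0) (none, 0)).1.getD "", (pvSel (pvItems d0) (none, 0)).2) := by
  simp only [orangecap]
  rw [pv_l_eq]
  rw [pv_outer (PySem.Dict.ofList (d0.map (fun p => (p.1, PySem.Dict.ofList p.2))))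
        (PySem.Dict.nodup_keys_ofList _) _ PySem.Dict.empty PySem.Dict.nodup_keys_empty]
  rw [PySem.Dict.items_foldl_insert_fresh _ (fun n => n) _ PySem.Dict.empty
        (fun a _ => PySem.Dict.contains_empty a) (by simp [PySem.Set.nodup_ofList])]
  rfl

-- ---- port B computes max? over pvItems ----
theorem pv_B_char (d0 : List (String × List (String × Int))) :
    orangecap_alt d0 = (match PySem.List.max? (pvItems d0) (fun kv => kv.2) with
      | some m => m
      | none => (("", 0) : String × Int)) := by
  simp only [orangecap_alt]
  rw [← List.foldl_flatMap]
  have hB : ((PySem.Dict.ofList (d0.map (fun p => (p.1, PySem.Dict.ofList p.2)))).values.flatMap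
        PySem.Dict.items).foldl
        (fun total pr => total.insert pr.1 (total.getD pr.1 0 + pr.2)) PySem.Dict.empty
      = pvAgg PySem.Dict.empty ((pvV d0).flatMap PySem.Dict.items) := rfl
  rw [hB]
  have hitems : (pvAgg PySem.Dict.empty ((pvV d0).flatMap PySem.Dict.items)).items = pvItems d0 := by
    have hnd : (pvAgg PySem.Dict.empty ((pvV d0).flatMap PySem.Dict.items)).keys.Nodup := by
      unfold pvAgg
      exact PySem.Dict.nodup_keys_foldl_insert_key _ (fun pr : String × Int => pr.1)
        (fun (d : PySem.Dict String Int) (x : String × Int) => d.getD x.1 0 + x.2) PySem.Dict.empty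
        PySem.Dict.nodup_keys_empty
    have hkeys : (pvAgg PySem.Dict.empty ((pvV d0).flatMap PySem.Dict.items)).keys = pvL d0 := by
      rw [show pvAgg PySem.Dict.empty ((pvV d0).flatMap PySem.Dict.items)
            = ((pvV d0).flatMap PySem.Dict.items).foldl
                (fun d x => d.insert ((fun pr : String × Int => pr.1) x)
                  ((fun (d : PySem.Dict String Int) (x : String × Int) => d.getD x.1 0 + x.2) d x)) PySem.Dict.empty from rfl]
      rw [PySem.Dict.keys_foldl_insert_key]
      rw [PySem.Dict.keys_empty]
      rw [show (((pvV d0).flatMap PySem.Dict.items).map (fun pr : String × Int => pr.1))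
            = (pvV d0).flatMap PySem.Dict.keys from by
        rw [List.map_flatMap]; rfl]
      rw [pvL, PySem.Set.ofList_eq_foldl]
      rfl
    rw [PySem.Dict.items_eq_map_keys _ hnd 0, hkeys]
    apply List.map_congr_left
    intro n _
    rw [pv_getD_agg, PySem.Dict.getD_empty, zero_add, ← pv_total_pairs]
  rw [hitems]

-- ---- Python's max() over a nonempty list is the running strict-max fold ----
theorem pv_max?_cons : ∀ (r : List (String × Int)) (x : String × Int),
    PySem.List.max? (x :: r) (fun kv => kv.2) = some (pvFm x r) := by
  intro r
  induction r with
  | nil => intro x; rfl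
  | cons y r ih =>
    intro x
    have hstep : PySem.List.max? (x :: y :: r) (fun kv => kv.2)
        = PySem.List.max? ((if x.2 < y.2 then y else x) :: r) (fun kv => kv.2) := by
      by_cases h : x.2 < y.2 <;> simp [PySem.List.max?, h]
    rw [hstep, ih]
    by_cases h : x.2 < y.2 <;> simp [pvFm, h]

-- ---- A's selection fold seeded with a bound playername ----
theorem pv_sel_lift (l : List (String × Int)) :
    ∀ (a : String × Int), pvSel l (some a.1, a.2) = (some (pvFm a l).1, (pvFm a l).2) := by
  induction l with
  | nil => intro a; rfl
  | cons y r ih =>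
    intro a
    simp only [pvSel, pvFm, List.foldl_cons] at *
    by_cases h : a.2 < y.2
    · simp only [if_pos h]; exact ih y
    · simp only [if_neg h]; exact ih a

-- ---- a dominated seed does not change the running strict-max ----
theorem pv_fm_congr (l : List (String × Int)) :
    ∀ (a b : String × Int), a.2 ≤ b.2 → (∃ p ∈ l, b.2 < p.2) → pvFm a l = pvFm b l := by
  induction l with
  | nil => intro a b _ h; exact absurd h (by simp)
  | cons y r ih =>
    intro a b hab ⟨p, hp, hbp⟩
    simp only [pvFm, List.foldl_cons]
    by_cases hby : b.2 < y.2
    · have hay : a.2 < y.2 := lt_of_le_of_lt hab hby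
      rw [if_pos hay, if_pos hby]
    · have hpr : p ∈ r := by
        rcases List.mem_cons.mp hp with h | h
        · exact absurd (h ▸ hbp) hby
        · exact h
      by_cases hay : a.2 < y.2
      · rw [if_pos hay, if_neg hby]
        exact ih y b (le_of_not_gt hby) ⟨p, hpr, hbp⟩
      · rw [if_neg hay, if_neg hby]
        exact ih a b hab ⟨p, hpr, hbp⟩

-- ---- with a positive entry present, A's fold returns exactly Python's max() ----
theorem pv_final_sel (its : List (String × Int)) :
    (∃ p ∈ its, 0 < p.2) →
    ∃ b, PySem.List.max? its (fun kv => kv.2) = some b ∧ pvSel its (none, 0) = (some b.1, b.2) := by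
  induction its with
  | nil => intro h; exact absurd h (by simp)
  | cons x r ih =>
    intro ⟨p, hp, hpos⟩
    by_cases hx : (0 : Int) < x.2
    · refine ⟨pvFm x r, pv_max?_cons r x, ?_⟩
      have hstep : pvSel (x :: r) (none, 0) = pvSel r (some x.1, x.2) := by
        simp only [pvSel, List.foldl_cons, if_pos hx]
      rw [hstep, pv_sel_lift r x]
    · have hpr : p ∈ r := by
        rcases List.mem_cons.mp hp with h | h
        · exact absurd (h ▸ hpos) hx
        · exact h
      obtain ⟨b, hmax, hsel⟩ := ih ⟨p, hpr, hpos⟩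
      have hstep : pvSel (x :: r) (none, 0) = pvSel r (none, 0) := by
        simp only [pvSel, List.foldl_cons, if_neg hx]
      cases r with
      | nil => cases hpr
      | cons z r2 =>
        rw [pv_max?_cons r2 z] at hmax
        have hb : b = pvFm z r2 := by injection hmax.symm
        refine ⟨b, ?_, by rw [hstep, hsel]⟩
        rw [pv_max?_cons (z :: r2) x, hb]
        congr 1
        show pvFm x (z :: r2) = pvFm z r2
        have hx0 : x.2 ≤ 0 := le_of_not_gt hx
        simp only [pvFm, List.foldl_cons]
        by_cases hxz : x.2 < z.2
        · rw [if_pos hxz]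
        · rw [if_neg hxz]
          have hzx : z.2 ≤ x.2 := le_of_not_gt hxz
          have hpz : p ∈ r2 := by
            rcases List.mem_cons.mp hpr with h | h
            · exact absurd (h ▸ hpos) (by omega)
            · exact h
          exact (pv_fm_congr r2 z x hzx ⟨p, hpz, lt_of_le_of_lt hx0 hpos⟩).symm

-- ---- Pre_ puts a positive entry into pvItems ----
theorem pv_mem_pos (d0 : List (String × List (String × Int))) (h : Pre_orangecap d0) :
    ∃ p ∈ pvItems d0, 0 < p.2 := by
  obtain ⟨e, _, q, _, hpos⟩ := h
  have hex : ∃ m ∈ pvV d0, m.getD q.1 0 ≠ 0 := by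
    by_contra hall
    push Not at hall
    have : pvTotal d0 q.1 = 0 := by
      apply List.sum_eq_zero
      intro x hx
      rcases List.mem_map.mp hx with ⟨m, hm, hxm⟩
      rw [← hxm]
      exact hall m hm
    omega
  obtain ⟨m, hm, hne⟩ := hex
  have hc : m.contains q.1 = true := by
    by_contra hc
    exact hne (PySem.Dict.getD_of_not_contains m 0 (by simpa using hc))
  have hk : q.1 ∈ m.keys := (PySem.Dict.contains_iff_mem_keys m q.1).mp hc
  have hL : q.1 ∈ pvL d0 :=
    (PySem.Set.mem_ofList _ q.1).mpr (List.mem_flatMap.mpr ⟨m, hm, hk⟩)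
  exact ⟨(q.1, pvTotal d0 q.1), List.mem_map.mpr ⟨q.1, hL, rfl⟩, hpos⟩

-- ===== VERDICT =====
theorem orangecap_spec : Claim_equal_orangecap := by
  intro d0 _ hPre
  unfold Spec_orangecap
  rw [pv_A_char, pv_B_char]
  obtain ⟨b, hmax, hsel⟩ := pv_final_sel (pvItems d0) (pv_mem_pos d0 hPre)
  rw [hsel, hmax]
  simp
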